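-- pv_equiv track=rewrite | github.com/brianellin/obob-nextjs | public/obob/glencoe/parse_glencoe_questions.py | _check_if_two_part
-- ===== SOURCE A (Python) =====
-- def _check_if_two_part(text):
--     """Helper function to check if a question is two-part and clean the text.
--     Returns (cleaned_text, is_two_part)"""
--     # Base indicators without punctuation
--     base_indicators = [
--         "[TWO PART QUESTION]",
--         "[Two-Part Question]",
--         "[Two Part Question]",
--         "[2 part question]",
--         "[Two Part]",
--         "(2 PARTS)",
--         "(Two part)",
--         "(Two-part)",
--         "(TWO PART)",
--         "TWO PART QUESTION",
--         "Two-Part Question",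
--         "Two Part Question",
--         "Two Parts",
--         "Two - Part Question"
--     ]
--
--     # Create variations with different punctuation
--     two_part_indicators = []
--     for indicator in base_indicators:
--         two_part_indicators.append(indicator)
--         two_part_indicators.append(indicator + ":")
--         two_part_indicators.append(indicator + ";")
--
--     is_two_part = False
--     cleaned_text = text.strip()
--
--     # Check for indicators only at the start of the text
--     text_lower = cleaned_text.lower()
--     for indicator in two_part_indicators:
--         if text_lower.startswith(indicator.lower()):
--             is_two_part = True
--             # Remove the indicator from the start
--             cleaned_text = cleaned_text[len(indicator):].strip()
--             # Remove any leading punctuation that might remain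
--             cleaned_text = cleaned_text.lstrip(':;').strip()
--             break
--
--     return cleaned_text, is_two_part
-- ===== SOURCE B (Python) =====
-- def _check_if_two_part(text):
--     """Same contract as A: returns (cleaned_text, is_two_part).
--     Instead of an ordered startswith scan over punctuation-expanded indicators,
--     index the lowercased base indicators by length in a dict of sets and test
--     one sliced prefix of the text per distinct length: the lowercased indicator
--     set is prefix-free, so at most one indicator can match and any lookup order
--     yields A's first-match result, while A's punctuation-suffixed variants are
--     redundant (the base already matches and the lstrip removes the leftover)."""
--     base_indicators = [
--         "[TWO PART QUESTION]",
--         "[Two-Part Question]",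
--         "[Two Part Question]",
--         "[2 part question]",
--         "[Two Part]",
--         "(2 PARTS)",
--         "(Two part)",
--         "(Two-part)",
--         "(TWO PART)",
--         "TWO PART QUESTION",
--         "Two-Part Question",
--         "Two Part Question",
--         "Two Parts",
--         "Two - Part Question"
--     ]
--     by_len = {}
--     for ind in base_indicators:
--         by_len.setdefault(len(ind), set()).add(ind.lower())
--     cleaned = text.strip()
--     low = cleaned.lower()
--     for length, pats in by_len.items():
--         if low[:length] in pats:
--             return cleaned[length:].strip().lstrip(':;').strip(), True
--     return cleaned, False
-- ===== Notes on version B (the rewrite author's own statement) =====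
-- stated objective: alternative
-- what changed: B replaces A's ordered startswith scan over 42 punctuation-expanded indicators by a length-indexed dict of sets of the 14 lowercased base indicators, testing one sliced prefix of the text per distinct length with a set lookup; this is equivalent because the lowercased indicator set is proved prefix-free (so at most one indicator matches and lookup order is irrelevant) and A's punctuation-suffixed variants are redundant.
import Mathlib
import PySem

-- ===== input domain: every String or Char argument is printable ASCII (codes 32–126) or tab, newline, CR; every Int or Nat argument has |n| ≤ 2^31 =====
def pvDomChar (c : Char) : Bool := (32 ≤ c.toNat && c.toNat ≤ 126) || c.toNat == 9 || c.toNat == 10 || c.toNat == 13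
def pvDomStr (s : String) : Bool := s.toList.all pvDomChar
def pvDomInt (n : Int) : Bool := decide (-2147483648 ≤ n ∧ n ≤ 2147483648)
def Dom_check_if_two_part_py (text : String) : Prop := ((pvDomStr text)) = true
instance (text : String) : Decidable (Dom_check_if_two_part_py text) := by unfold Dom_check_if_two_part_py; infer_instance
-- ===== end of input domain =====

-- B replaces A's ordered startswith scan over 42 punctuation-expanded indicators by a length-indexed
-- hash of the 14 lowercased base indicators with one sliced-prefix set lookup per distinct length
-- (equivalent because the lowercased indicator set is prefix-free); objective: alternative, not faster.

-- the 14 base indicator strings both Python versions carry literally (as lists of code points)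
def pvBaseIndicators : List (List Char) :=
  [ "[TWO PART QUESTION]".toList,
    "[Two-Part Question]".toList,
    "[Two Part Question]".toList,
    "[2 part question]".toList,
    "[Two Part]".toList,
    "(2 PARTS)".toList,
    "(Two part)".toList,
    "(Two-part)".toList,
    "(TWO PART)".toList,
    "TWO PART QUESTION".toList,
    "Two-Part Question".toList,
    "Two Part Question".toList,
    "Two Parts".toList,
    "Two - Part Question".toList ]

-- hand port of the Python lstrip-with-argument call: drop every leading character that
-- occurs in the given two-character set (exact Python semantics of str.lstrip(chars))
def pvLstripColonSemi (s : List Char) : List Char := s.dropWhile (fun c => c == ':' || c == ';')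

-- ===== PORT A =====
-- A's first loop: two_part_indicators.append(ind); append(ind + ":"); append(ind + ";")
def pvExpandA (bs : List (List Char)) : List (List Char) :=
  bs.foldl (fun acc i => acc ++ [i, i ++ [':'], i ++ [';']]) []

-- A's second loop with its break: first indicator matching at the start wins, else fall through.
-- cleaned_text[len(indicator):] is List.drop (a slice from a nonneg index, cf. slice_from_natCast).
def pvLoopA (inds : List (List Char)) (low cleaned : List Char) : List Char × Bool :=
  match inds with
  | [] => (cleaned, false)
  | i :: rest =>
    if PySem.Chars.startswith low (PySem.Chars.lower i) then
      (PySem.Chars.strip (pvLstripColonSemi (PySem.Chars.strip (cleaned.drop i.length))), true)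
    else pvLoopA rest low cleaned

def check_if_two_part_py (text : String) : String × Bool :=
  let cleaned := PySem.Chars.strip text.toList
  let text_lower := PySem.Chars.lower cleaned
  let r := pvLoopA (pvExpandA pvBaseIndicators) text_lower cleaned
  (String.ofList r.1, r.2)

-- ===== PORT B =====
-- Source B's index-building loop: by_len.setdefault(len(ind), set()).add(ind.lower()), i.e.
-- by_len[L] = by_len.get(L, set()) with ind.lower() added — PySem.Dict.modify + PySem.Set.add.
def pvByLen : PySem.Dict Nat (PySem.Set (List Char)) :=
  pvBaseIndicators.foldl
    (fun d i => d.modify i.length [] (fun s => PySem.Set.add s (PySem.Chars.lower i)))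
    PySem.Dict.empty

-- Source B's lookup loop over by_len.items(): low[:L] (a nonneg-bound slice, = List.take L,
-- cf. slice_to_natCast) tested for set membership; first hit returns.
def pvLoopB (groups : List (Nat × PySem.Set (List Char))) (low cleaned : List Char) :
    List Char × Bool :=
  match groups with
  | [] => (cleaned, false)
  | (L, pats) :: rest =>
    if PySem.Set.contains pats (low.take L) then
      (PySem.Chars.strip (pvLstripColonSemi (PySem.Chars.strip (cleaned.drop L))), true)
    else pvLoopB rest low cleaned

def check_if_two_part_py_alt (text : String) : String × Bool :=
  let cleaned := PySem.Chars.strip text.toList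
  let low := PySem.Chars.lower cleaned
  let r := pvLoopB pvByLen.items low cleaned
  (String.ofList r.1, r.2)

-- ===== PRECONDITION & SPEC =====
def Spec_check_if_two_part_py (text : String) (out : String × Bool) : Prop := out = check_if_two_part_py_alt text
instance (text : String) (out : String × Bool) : Decidable (Spec_check_if_two_part_py text out) := by unfold Spec_check_if_two_part_py; infer_instance

-- ===== CLAIM (what is proved, stated in full; the proofs are below) =====
def Claim_equal_check_if_two_part_py : Prop := ∀ (text : String), Dom_check_if_two_part_py text → Spec_check_if_two_part_py text (check_if_two_part_py text)

-- ===== LEMMAS AND PROOFS =====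

-- the 14 lowercased indicators, the ground set both proofs reason over
def pvAllLow : List (List Char) := pvBaseIndicators.map PySem.Chars.lower

-- if low does not start with p, it does not start with any extension p ++ q
theorem pv_startswith_append_false (low p q : List Char)
    (h : PySem.Chars.startswith low p = false) :
    PySem.Chars.startswith low (p ++ q) = false := by
  rw [← Bool.not_eq_true] at *
  rw [PySem.Chars.startswith_iff] at *
  exact fun hpq => h ((List.prefix_append p q).trans hpq)

theorem pv_lower_append (a b : List Char) :
    PySem.Chars.lower (a ++ b) = PySem.Chars.lower a ++ PySem.Chars.lower b := by
  simp [PySem.Chars.lower]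

theorem pv_lower_length (b : List Char) : (PySem.Chars.lower b).length = b.length := by
  simp [PySem.Chars.lower]

-- A's scan over the expanded indicator list equals a first-match over the 14 bases
theorem pv_loop_eq_find (bs : List (List Char)) (low cleaned : List Char) :
    pvLoopA (bs.flatMap (fun i => [i, i ++ [':'], i ++ [';']])) low cleaned =
      match bs.find? (fun b => PySem.Chars.startswith low (PySem.Chars.lower b)) with
      | none => (cleaned, false)
      | some b =>
          (PySem.Chars.strip (pvLstripColonSemi (PySem.Chars.strip (cleaned.drop b.length))), true) := by
  induction bs with
  | nil => simp [pvLoopA]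
  | cons b bs ih =>
    by_cases hb : PySem.Chars.startswith low (PySem.Chars.lower b) = true
    · simp [List.flatMap_cons, pvLoopA, hb, List.find?]
    · rw [Bool.not_eq_true] at hb
      have hc : PySem.Chars.startswith low (PySem.Chars.lower (b ++ [':'])) = false := by
        rw [pv_lower_append]; exact pv_startswith_append_false _ _ _ hb
      have hs : PySem.Chars.startswith low (PySem.Chars.lower (b ++ [';'])) = false := by
        rw [pv_lower_append]; exact pv_startswith_append_false _ _ _ hb
      simp [List.flatMap_cons, pvLoopA, hb, hc, hs, List.find?, ih]

-- the lowercased indicator set is PREFIX-FREE: no member is a proper prefix of another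
theorem pv_prefix_free : ∀ p ∈ pvAllLow, ∀ q ∈ pvAllLow, p <+: q → p = q := by decide

-- B's hash groups contain exactly lowercased indicators, keyed by their length
theorem pv_groups_good :
    ∀ Lg ∈ pvByLen.items, ∀ p ∈ Lg.2, p ∈ pvAllLow ∧ p.length = Lg.1 := by decide

-- every lowercased indicator sits in some group of B's hash
theorem pv_groups_cover : ∀ p ∈ pvAllLow, ∃ Lg ∈ pvByLen.items, p ∈ Lg.2 := by decide

-- when NO lowercased indicator is a prefix of low, every group lookup misses
theorem pv_loopB_nomatch (groups : List (Nat × PySem.Set (List Char))) (low cleaned : List Char)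
    (hgood : ∀ Lg ∈ groups, ∀ p ∈ Lg.2, p ∈ pvAllLow ∧ p.length = Lg.1)
    (hnone : ∀ p ∈ pvAllLow, ¬ p <+: low) :
    pvLoopB groups low cleaned = (cleaned, false) := by
  induction groups with
  | nil => rfl
  | cons Lg rest ih =>
    obtain ⟨L, g⟩ := Lg
    have hmiss : PySem.Set.contains g (low.take L) = false := by
      by_contra h
      rw [Bool.not_eq_false, PySem.Set.contains_iff] at h
      exact hnone _ (hgood (L, g) (List.mem_cons_self) _ h).1 (List.take_prefix L low)
    simp only [pvLoopB]
    rw [hmiss]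
    simpa using ih (fun Lg h => hgood Lg (List.mem_cons_of_mem _ h))

-- when b is THE lowercased indicator prefixing low, the loop stops exactly at b's group
theorem pv_loopB_match (groups : List (Nat × PySem.Set (List Char))) (low cleaned b : List Char)
    (hb : b <+: low)
    (huniq : ∀ p ∈ pvAllLow, p <+: low → p = b)
    (hgood : ∀ Lg ∈ groups, ∀ p ∈ Lg.2, p ∈ pvAllLow ∧ p.length = Lg.1)
    (hfound : ∃ Lg ∈ groups, b ∈ Lg.2) :
    pvLoopB groups low cleaned =
      (PySem.Chars.strip (pvLstripColonSemi (PySem.Chars.strip (cleaned.drop b.length))), true) := by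
  induction groups with
  | nil => simp at hfound
  | cons Lg rest ih =>
    obtain ⟨L, g⟩ := Lg
    by_cases hbg : b ∈ g
    · have hL : b.length = L := (hgood (L, g) (List.mem_cons_self) b hbg).2
      have htake : low.take L = b := by
        rw [← hL]; exact (List.prefix_iff_eq_take.mp hb).symm
      have hhit : PySem.Set.contains g (low.take L) = true := by
        rw [PySem.Set.contains_iff, htake]; exact hbg
      simp only [pvLoopB]
      rw [hhit, hL]
      simp
    · have hmiss : PySem.Set.contains g (low.take L) = false := by
        by_contra h
        rw [Bool.not_eq_false, PySem.Set.contains_iff] at h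
        have hp := hgood (L, g) (List.mem_cons_self) _ h
        have heq := huniq _ hp.1 (List.take_prefix L low)
        exact hbg (heq ▸ h)
      have hrest : ∃ Lg ∈ rest, b ∈ Lg.2 := by
        obtain ⟨Lg', hLg', hbLg'⟩ := hfound
        rcases List.mem_cons.mp hLg' with h | h
        · exact absurd (by simpa [h] using hbLg') hbg
        · exact ⟨Lg', h, hbLg'⟩
      simp only [pvLoopB]
      rw [hmiss]
      simpa using ih (fun Lg h => hgood Lg (List.mem_cons_of_mem _ h)) hrest

-- ===== VERDICT (by name: the statement is the Claim_ definition above) =====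
theorem check_if_two_part_py_spec : Claim_equal_check_if_two_part_py := by
  intro text _
  unfold Spec_check_if_two_part_py
  dsimp only [check_if_two_part_py, check_if_two_part_py_alt]
  rw [pvExpandA, PySem.List.foldl_append_eq_flatMap, List.nil_append, pv_loop_eq_find]
  set cleaned := PySem.Chars.strip text.toList with hcl
  set low := PySem.Chars.lower cleaned with hlow
  cases hf : pvBaseIndicators.find? (fun b => PySem.Chars.startswith low (PySem.Chars.lower b)) with
  | none =>
    have hnone : ∀ p ∈ pvAllLow, ¬ p <+: low := by
      intro p hp hpre
      obtain ⟨b, hb, rfl⟩ := List.mem_map.mp hp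
      have := List.find?_eq_none.mp hf b hb
      simp only [PySem.Chars.startswith_iff] at this
      exact this hpre
    rw [pv_loopB_nomatch pvByLen.items low cleaned pv_groups_good hnone]
  | some b =>
    have hmem : b ∈ pvBaseIndicators := List.mem_of_find?_eq_some hf
    have hpred : PySem.Chars.startswith low (PySem.Chars.lower b) = true := by
      simpa using List.find?_some hf
    have hb' : PySem.Chars.lower b <+: low := (PySem.Chars.startswith_iff _ _).mp hpred
    have hmem' : PySem.Chars.lower b ∈ pvAllLow := List.mem_map_of_mem hmem
    have huniq : ∀ p ∈ pvAllLow, p <+: low → p = PySem.Chars.lower b := by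
      intro p hp hpre
      rcases List.prefix_or_prefix_of_prefix hpre hb' with h | h
      · exact pv_prefix_free p hp _ hmem' h
      · exact (pv_prefix_free _ hmem' p hp h).symm
    rw [pv_loopB_match pvByLen.items low cleaned (PySem.Chars.lower b) hb' huniq
      pv_groups_good (pv_groups_cover _ hmem'), pv_lower_length]
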